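-- pv_equiv track=rewrite | github.com/Johnnie-Wallker/EvolutionAI | utils/FT_util.py | process_json
-- ===== SOURCE A (Python) =====
-- def process_json(s: str) -> tuple[int, int]:
--     """
--     Finds the start and end index of the second JSON object in a string by balancing braces.
--     Returns (start_index, end_index) of the second JSON.
--     """
--     # Find the start of the first JSON object
--     first_brace = s.find('{')
--     if first_brace == -1:
--         return -1, -1
--
--     open_braces = 0
--     # Find the end of the first JSON
--     for i in range(first_brace, len(s)):
--         if s[i] == '{':
--             open_braces += 1
--         elif s[i] == '}':
--             open_braces -= 1
--         if open_braces == 0: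
--             second_brace = s.find('{', i + 1)
--             if second_brace == -1:
--                 return -1, -1
--             # --- New: find the end of the second JSON ---
--             open_braces = 0
--             for j in range(second_brace, len(s)):
--                 if s[j] == '{':
--                     open_braces += 1
--                 elif s[j] == '}':
--                     open_braces -= 1
--                 if open_braces == 0:
--                     return second_brace, j + 1
--             return second_brace, -1
--     return -1, -1
-- ===== SOURCE B (Python) =====
-- def process_json(s: str) -> tuple[int, int]:
--     """One linear pass with a depth counter; record objects as depth returns to 0."""
--     depth = 0
--     start = -1
--     closed = 0
--     for i, ch in enumerate(s):
--         if ch == '{':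
--             if depth == 0:
--                 start = i
--             depth += 1
--         elif ch == '}' and depth > 0:
--             depth -= 1
--             if depth == 0:
--                 closed += 1
--                 if closed == 2:
--                     return start, i + 1
--     if closed == 1 and depth > 0:
--         return start, -1
--     return -1, -1
-- ===== Notes on version B (the rewrite author's own statement) =====
-- stated objective: idiomatic
-- what changed: Replaced A's two nested scans (find the first opening brace, balance braces to its close, search again for the next opening brace, balance again) by a single linear pass with one depth counter that records where each top-level object starts and returns when the second one completes.
import Mathlib
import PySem

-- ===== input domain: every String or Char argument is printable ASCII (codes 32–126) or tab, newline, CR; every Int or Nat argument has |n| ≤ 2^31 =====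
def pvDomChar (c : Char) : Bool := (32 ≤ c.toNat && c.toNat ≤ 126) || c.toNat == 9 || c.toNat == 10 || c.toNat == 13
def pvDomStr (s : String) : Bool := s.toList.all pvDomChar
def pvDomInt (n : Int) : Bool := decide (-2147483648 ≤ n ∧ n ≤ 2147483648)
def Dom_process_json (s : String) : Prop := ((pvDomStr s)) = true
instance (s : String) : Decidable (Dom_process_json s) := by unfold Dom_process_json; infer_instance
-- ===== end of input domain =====

-- B does one linear pass with a single depth counter instead of A's two nested find/scan passes; same return value everywhere (objective: idiomatic/simpler).

-- ===== PORT A =====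
-- inner 'for j in range(second, len(s))' of A: scan the second object
def pjA_loop2 (rest : List Char) (j : Nat) (second : Int) (depth : Int) : Int × Int :=
  match rest with
  | [] => (second, -1)
  | c :: cs =>
    let d := if c = '{' then depth + 1 else if c = '}' then depth - 1 else depth
    if d = 0 then (second, (j : Int) + 1) else pjA_loop2 cs (j + 1) second d

-- outer 'for i in range(first_brace, len(s))' of A
def pjA_loop1 (rest : List Char) (i : Nat) (depth : Int) (cs : List Char) : Int × Int :=
  match rest with
  | [] => (-1, -1)
  | c :: rs =>
    let d := if c = '{' then depth + 1 else if c = '}' then depth - 1 else depth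
    if d = 0 then
      let second := PySem.Chars.findFrom cs ['{'] ((i : Int) + 1) none  -- s.find('{', i + 1)
      if second = -1 then (-1, -1)
      else pjA_loop2 (cs.drop second.toNat) second.toNat second 0
    else pjA_loop1 rs (i + 1) d cs

def process_json (s : String) : Int × Int :=
  let cs := s.toList
  let first := PySem.Chars.find cs ['{']  -- s.find('{')
  if first = -1 then (-1, -1)
  else pjA_loop1 (cs.drop first.toNat) first.toNat 0 cs

-- ===== PORT B =====
-- single pass of B: depth counter, start of the current top-level object, number closed
def pjB_loop (rest : List Char) (i : Nat) (depth : Int) (start : Int) (closed : Nat) : Int × Int :=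
  match rest with
  | [] => if closed = 1 ∧ 0 < depth then (start, -1) else (-1, -1)
  | c :: cs =>
    if c = '{' then
      pjB_loop cs (i + 1) (depth + 1) (if depth = 0 then (i : Int) else start) closed
    else if c = '}' ∧ 0 < depth then
      if depth = 1 then
        if closed = 1 then (start, (i : Int) + 1)
        else pjB_loop cs (i + 1) 0 start (closed + 1)
      else pjB_loop cs (i + 1) (depth - 1) start closed
    else pjB_loop cs (i + 1) depth start closed

def process_json_alt (s : String) : Int × Int :=
  pjB_loop s.toList 0 0 (-1) 0

-- ===== PRECONDITION & SPEC =====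
def Spec_process_json (s : String) (out : Int × Int) : Prop := out = process_json_alt s
instance (s : String) (out : Int × Int) : Decidable (Spec_process_json s out) := by unfold Spec_process_json; infer_instance

-- ===== CLAIM (what is proved, stated in full; the proofs are below) =====
def Claim_equal_process_json : Prop := ∀ (s : String), Dom_process_json s → Spec_process_json s (process_json s)

-- ===== LEMMAS AND PROOFS =====

-- singleton infix ↔ membership
theorem singleton_infix_iff_mem {c : Char} {l : List Char} : [c] <:+: l ↔ c ∈ l := by
  constructor
  · intro h; exact h.mem (List.mem_singleton_self c)
  · intro h
    obtain ⟨p, q, rfl⟩ := List.append_of_mem h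
    exact ⟨p, q, by simp⟩

theorem getElem?_findIdx_of_mem {c : Char} {l : List Char} (h : c ∈ l) :
    l[l.findIdx (· = c)]? = some c := by
  induction l with
  | nil => cases h
  | cons a t ih =>
    by_cases ha : a = c
    · subst ha; simp [List.findIdx_cons]
    · have ht : c ∈ t := by
        rcases List.mem_cons.1 h with h1 | h1
        · exact absurd h1.symm ha
        · exact h1
      simp [List.findIdx_cons, ha, ih ht]

theorem findIdx_le_of_getElem? {c : Char} {l : List Char} {j : Nat} (h : l[j]? = some c) :
    l.findIdx (· = c) ≤ j := by
  induction l generalizing j with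
  | nil => simp at h
  | cons a t ih =>
    by_cases ha : a = c
    · simp [List.findIdx_cons, ha]
    · cases j with
      | zero => simp at h; exact absurd h ha
      | succ j' =>
        simp only [List.getElem?_cons_succ] at h
        have := ih h
        simp [List.findIdx_cons, ha]
        omega

theorem drop_of_getElem? {c : Char} {l : List Char} {k : Nat} (h : l[k]? = some c) :
    l.drop k = c :: l.drop (k + 1) := by
  rcases List.getElem?_eq_some_iff.1 h with ⟨hk, hc⟩
  rw [List.drop_eq_getElem_cons hk, hc]

-- Chars.find with a singleton needle is findIdx
theorem find_singleton_mem {l : List Char} {c : Char} (h : c ∈ l) :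
    PySem.Chars.find l [c] = (l.findIdx (· = c) : Int) := by
  have hinf : [c] <:+: l := singleton_infix_iff_mem.2 h
  have h0 : 0 ≤ PySem.Chars.find l [c] := (PySem.Chars.find_nonneg_iff l [c]).2 hinf
  obtain ⟨hpre, hmin⟩ := PySem.Chars.find_spec h0
  set j := (PySem.Chars.find l [c]).toNat with hj
  set k := l.findIdx (· = c) with hk
  have hjc : l[j]? = some c := by
    obtain ⟨t, ht⟩ := hpre
    have h2 : (l.drop j)[0]? = some c := by rw [← ht]; rfl
    simpa [List.getElem?_drop] using h2
  have hkj : k ≤ j := findIdx_le_of_getElem? hjc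
  have hjk : j ≤ k := by
    by_contra hlt
    have hkc : l[k]? = some c := getElem?_findIdx_of_mem h
    exact hmin k (by omega) ⟨l.drop (k + 1), (drop_of_getElem? hkc).symm⟩
  have : j = k := le_antisymm hjk hkj
  omega

-- the first '{' heads the dropped suffix
theorem findIdx_drop {l : List Char} (h : '{' ∈ l) :
    l.drop (l.findIdx (· = '{')) = '{' :: l.drop (l.findIdx (· = '{') + 1) :=
  drop_of_getElem? (getElem?_findIdx_of_mem h)

-- one-step unfolding lemmas for the three loops
theorem stepA2_open (rs : List Char) (j : Nat) (s2 d : Int) (h : ¬ d + 1 = 0) :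
    pjA_loop2 ('{' :: rs) j s2 d = pjA_loop2 rs (j + 1) s2 (d + 1) := by
  simp [pjA_loop2, h]

theorem stepA2_close1 (rs : List Char) (j : Nat) (s2 : Int) :
    pjA_loop2 ('}' :: rs) j s2 1 = (s2, (j : Int) + 1) := by
  simp [pjA_loop2]

theorem stepA2_close (rs : List Char) (j : Nat) (s2 d : Int) (h : ¬ d - 1 = 0) :
    pjA_loop2 ('}' :: rs) j s2 d = pjA_loop2 rs (j + 1) s2 (d - 1) := by
  simp [pjA_loop2, h]

theorem stepA2_other {c : Char} (rs : List Char) (j : Nat) (s2 d : Int)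
    (h1 : ¬ c = '{') (h2 : ¬ c = '}') (h3 : ¬ d = 0) :
    pjA_loop2 (c :: rs) j s2 d = pjA_loop2 rs (j + 1) s2 d := by
  simp [pjA_loop2, h1, h2, h3]

theorem stepA1_open (rs : List Char) (i : Nat) (d : Int) (cs : List Char) (h : ¬ d + 1 = 0) :
    pjA_loop1 ('{' :: rs) i d cs = pjA_loop1 rs (i + 1) (d + 1) cs := by
  simp [pjA_loop1, h]

theorem stepA1_close1 (rs : List Char) (i : Nat) (cs : List Char) :
    pjA_loop1 ('}' :: rs) i 1 cs =
      (if PySem.Chars.findFrom cs ['{'] ((i : Int) + 1) none = -1 then (-1, -1)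
       else
        pjA_loop2 (cs.drop (PySem.Chars.findFrom cs ['{'] ((i : Int) + 1) none).toNat)
          (PySem.Chars.findFrom cs ['{'] ((i : Int) + 1) none).toNat
          (PySem.Chars.findFrom cs ['{'] ((i : Int) + 1) none) 0) := by
  simp [pjA_loop1]

theorem stepA1_close (rs : List Char) (i : Nat) (d : Int) (cs : List Char) (h : ¬ d - 1 = 0) :
    pjA_loop1 ('}' :: rs) i d cs = pjA_loop1 rs (i + 1) (d - 1) cs := by
  simp [pjA_loop1, h]

theorem stepA1_other {c : Char} (rs : List Char) (i : Nat) (d : Int) (cs : List Char)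
    (h1 : ¬ c = '{') (h2 : ¬ c = '}') (h3 : ¬ d = 0) :
    pjA_loop1 (c :: rs) i d cs = pjA_loop1 rs (i + 1) d cs := by
  simp [pjA_loop1, h1, h2, h3]

theorem stepB_open (rs : List Char) (i : Nat) (d st : Int) (cl : Nat) :
    pjB_loop ('{' :: rs) i d st cl =
      pjB_loop rs (i + 1) (d + 1) (if d = 0 then (i : Int) else st) cl := by
  simp [pjB_loop]

theorem stepB_close1_ret (rs : List Char) (i : Nat) (st : Int) :
    pjB_loop ('}' :: rs) i 1 st 1 = (st, (i : Int) + 1) := by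
  simp [pjB_loop]

theorem stepB_close1_cont (rs : List Char) (i : Nat) (st : Int) :
    pjB_loop ('}' :: rs) i 1 st 0 = pjB_loop rs (i + 1) 0 st 1 := by
  simp [pjB_loop]

theorem stepB_close (rs : List Char) (i : Nat) (d st : Int) (cl : Nat)
    (h0 : 0 < d) (h1 : ¬ d = 1) :
    pjB_loop ('}' :: rs) i d st cl = pjB_loop rs (i + 1) (d - 1) st cl := by
  simp [pjB_loop, h0, h1]

theorem stepB_other {c : Char} (rs : List Char) (i : Nat) (d st : Int) (cl : Nat)
    (h1 : ¬ c = '{') (h2 : ¬ (c = '}' ∧ 0 < d)) :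
    pjB_loop (c :: rs) i d st cl = pjB_loop rs (i + 1) d st cl := by
  simp only [pjB_loop, if_neg h1, if_neg h2]

-- second-object scan: B at depth ≥ 1, closed = 1 behaves like A's inner loop
theorem loop2_sim (rest : List Char) : ∀ (i : Nat) (d s2 : Int), 1 ≤ d →
    pjB_loop rest i d s2 1 = pjA_loop2 rest i s2 d := by
  induction rest with
  | nil =>
    intro i d s2 hd
    simp [pjB_loop, pjA_loop2, show (0 : Int) < d by omega]
  | cons c cs ih =>
    intro i d s2 hd
    by_cases hb : c = '{'
    · subst hb
      rw [stepB_open, stepA2_open _ _ _ _ (by omega), if_neg (by omega)]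
      exact ih (i + 1) (d + 1) s2 (by omega)
    · by_cases hc : c = '}'
      · subst hc
        by_cases h1 : d = 1
        · subst h1; rw [stepB_close1_ret, stepA2_close1]
        · rw [stepB_close _ _ _ _ _ (by omega) h1, stepA2_close _ _ _ _ (by omega)]
          exact ih (i + 1) (d - 1) s2 (by omega)
      · rw [stepB_other _ _ _ _ _ hb (by simp [hc]), stepA2_other _ _ _ _ hb hc (by omega)]
        exact ih (i + 1) d s2 hd

-- no '{' left, depth 0: B ends with (-1, -1) whatever closed is
theorem loopB_none (rest : List Char) : ∀ (i : Nat) (st : Int) (cl : Nat), '{' ∉ rest →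
    pjB_loop rest i 0 st cl = (-1, -1) := by
  induction rest with
  | nil => intro i st cl _; simp [pjB_loop]
  | cons c cs ih =>
    intro i st cl h
    have hb : ¬ c = '{' := fun hc => h (hc ▸ List.mem_cons_self)
    have ht : '{' ∉ cs := fun hc => h (List.mem_cons_of_mem _ hc)
    rw [stepB_other _ _ _ _ _ hb (by simp), ih (i + 1) st cl ht]

-- searching phase (depth 0): B skips to just past the next '{'
theorem searchB (rest : List Char) : ∀ (i : Nat) (st : Int) (cl : Nat), '{' ∈ rest →
    pjB_loop rest i 0 st cl =
      pjB_loop (rest.drop (rest.findIdx (· = '{') + 1)) (i + rest.findIdx (· = '{') + 1) 1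
        ((i + rest.findIdx (· = '{') : Nat) : Int) cl := by
  induction rest with
  | nil => intro _ _ _ h; cases h
  | cons c cs ih =>
    intro i st cl h
    by_cases hb : c = '{'
    · subst hb
      rw [stepB_open]
      simp [List.findIdx_cons]
    · have ht : '{' ∈ cs := by
        rcases List.mem_cons.1 h with h1 | h1
        · exact absurd h1.symm hb
        · exact h1
      have hfi : (c :: cs).findIdx (· = '{') = cs.findIdx (· = '{') + 1 := by
        simp [List.findIdx_cons, hb]
      rw [hfi, stepB_other _ _ _ _ _ hb (by simp), ih (i + 1) st cl ht, List.drop_succ_cons]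
      congr 1 <;> omega

-- main simulation inside the first object (k is the remaining fuel, closed = 0)
theorem loop1_sim (cs : List Char) : ∀ (k : Nat) (i : Nat) (d st : Int), 1 ≤ d →
    i + k = cs.length →
    pjA_loop1 (cs.drop i) i d cs = pjB_loop (cs.drop i) i d st 0 := by
  intro k
  induction k with
  | zero =>
    intro i d st hd hlen
    have hnil : cs.drop i = [] := by
      apply List.drop_eq_nil_of_le; omega
    simp [hnil, pjA_loop1, pjB_loop]
  | succ k ih =>
    intro i d st hd hlen
    have hi : i < cs.length := by omega
    rw [List.drop_eq_getElem_cons hi]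
    by_cases hb : cs[i] = '{'
    · rw [hb, stepA1_open _ _ _ _ (by omega), stepB_open, if_neg (by omega),
        ih (i + 1) (d + 1) st (by omega) (by omega)]
    · by_cases hc : cs[i] = '}'
      · by_cases h1 : d = 1
        · subst h1
          -- A finds s.find('{', i+1) and scans the second object; B scans on with closed = 1
          rw [hc, stepA1_close1, stepB_close1_cont]
          have hcast : ((i : Int) + 1) = ((i + 1 : Nat) : Int) := by push_cast; ring
          rw [hcast, PySem.Chars.findFrom_natCast cs ['{'] (i + 1) (by omega)]
          by_cases hmem : '{' ∈ cs.drop (i + 1)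
          · set k' := (cs.drop (i + 1)).findIdx (· = '{') with hk'
            have hfind : PySem.Chars.find (cs.drop (i + 1)) ['{'] = (k' : Int) :=
              find_singleton_mem hmem
            have hne : ¬ PySem.Chars.find (cs.drop (i + 1)) ['{'] = -1 := by rw [hfind]; omega
            rw [if_neg hne, hfind, if_neg (by omega)]
            have htn : (((i + 1 : Nat) : Int) + (k' : Int)).toNat = i + 1 + k' := by omega
            rw [htn]
            have hdd : cs.drop (i + 1 + k') = (cs.drop (i + 1)).drop k' := by
              rw [List.drop_drop]
              try congr 1
              try omega
            rw [hdd, findIdx_drop hmem, ← hk', stepA2_open _ _ _ _ (by norm_num),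
              searchB (cs.drop (i + 1)) (i + 1) st 1 hmem, ← hk',
              loop2_sim _ _ 1 _ (by omega)]
            congr 1
          · have hfind : PySem.Chars.find (cs.drop (i + 1)) ['{'] = -1 :=
              (PySem.Chars.find_eq_neg_one_iff _ _).2
                (fun hinf => hmem (singleton_infix_iff_mem.1 hinf))
            rw [hfind, loopB_none _ _ _ _ hmem]
            norm_num
        · rw [hc, stepA1_close _ _ _ _ (by omega), stepB_close _ _ _ _ _ (by omega) h1,
            ih (i + 1) (d - 1) st (by omega) (by omega)]
      · rw [stepA1_other _ _ _ _ hb hc (by omega), stepB_other _ _ _ _ _ hb (by simp [hc]),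
          ih (i + 1) d st hd (by omega)]

-- ===== VERDICT (by name: the statement is the Claim_ definition above) =====
theorem process_json_spec : Claim_equal_process_json := by
  intro s _
  unfold Spec_process_json
  simp only [process_json, process_json_alt]
  set cs := s.toList with hcs
  by_cases hmem : '{' ∈ cs
  · set k0 := cs.findIdx (· = '{') with hk0
    have hfind : PySem.Chars.find cs ['{'] = (k0 : Int) := find_singleton_mem hmem
    have hne : ¬ ((k0 : Int) = -1) := by omega
    rw [hfind]
    simp only [if_neg hne, Int.toNat_natCast]
    have hdrop := findIdx_drop hmem
    have hk0lt : k0 < cs.length := by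
      have := congrArg List.length hdrop
      simp only [List.length_drop, List.length_cons] at this
      omega
    rw [← hk0] at hdrop
    rw [hdrop, stepA1_open _ _ _ _ (by norm_num),
      searchB cs 0 (-1) 0 hmem, ← hk0]
    simp only [zero_add]
    exact loop1_sim cs (cs.length - (k0 + 1)) (k0 + 1) (0 + 1) (k0 : Int) (by omega) (by omega)
  · have hfind : PySem.Chars.find cs ['{'] = -1 :=
      (PySem.Chars.find_eq_neg_one_iff _ _).2
        (fun hinf => hmem (singleton_infix_iff_mem.1 hinf))
    rw [hfind, if_pos rfl, (loopB_none cs 0 (-1) 0 hmem)]
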